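-- pv_equiv track=rewrite | github.com/FranGozze/bingo | src/bingo.py | no_mas_de_2_celdas_vacias_juntas
-- ===== SOURCE A (Python) =====
-- def no_mas_de_2_celdas_vacias_juntas(mi_carton):
--
--     for fila in mi_carton:
--         contador = 0
--         for celda in fila:
--             if celda == 0 :
--                 contador += 1
--             else:
--                 contador = 0
--             if contador == 3 :
--                 return False
--
--     return True
-- ===== SOURCE B (Python) =====
-- def max_zero_run(fila):
--     # two-pointer scan: measure each maximal run of zeros, keep the longest
--     i, best, n = 0, 0, len(fila)
--     while i < n:
--         if fila[i] == 0:
--             j = i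
--             while j < n and fila[j] == 0:
--                 j += 1
--             if j - i > best:
--                 best = j - i
--             i = j
--         else:
--             i += 1
--     return best
--
-- def no_mas_de_2_celdas_vacias_juntas(mi_carton):
--     return all(max_zero_run(fila) < 3 for fila in mi_carton)
-- ===== Notes on version B (the rewrite author's own statement) =====
-- stated objective: alternative
-- what changed: Replaces the reset-on-nonzero running counter with a two-pointer run-length scan that computes each row's longest maximal run of zeros and checks all rows via all(... < 3).
import Mathlib
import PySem

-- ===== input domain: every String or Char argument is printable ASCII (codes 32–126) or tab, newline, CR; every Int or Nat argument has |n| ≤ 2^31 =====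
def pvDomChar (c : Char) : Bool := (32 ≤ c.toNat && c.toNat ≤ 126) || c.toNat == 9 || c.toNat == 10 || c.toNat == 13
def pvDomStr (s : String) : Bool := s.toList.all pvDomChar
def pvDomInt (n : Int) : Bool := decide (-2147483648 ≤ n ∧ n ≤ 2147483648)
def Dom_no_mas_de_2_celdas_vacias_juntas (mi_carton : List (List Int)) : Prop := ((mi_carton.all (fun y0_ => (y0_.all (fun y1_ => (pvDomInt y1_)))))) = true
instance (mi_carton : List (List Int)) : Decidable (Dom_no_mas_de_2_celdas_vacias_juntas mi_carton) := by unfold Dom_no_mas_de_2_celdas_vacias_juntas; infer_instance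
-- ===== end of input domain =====

-- B replaces A's reset-on-nonzero running counter with a two-pointer maximal-run scan per row (alternative decomposition, same cost).

-- ===== PORT A =====
-- inner loop of A: running counter, early return False when it reaches 3
def pvRowHas3 : List Int → Int → Bool
  | [], _ => false
  | celda :: rest, contador =>
    let contador' := if celda = 0 then contador + 1 else 0
    if contador' = 3 then true else pvRowHas3 rest contador'

def no_mas_de_2_celdas_vacias_juntas (mi_carton : List (List Int)) : Bool :=
  match mi_carton with
  | [] => true
  | fila :: rest =>
    if pvRowHas3 fila 0 then false else no_mas_de_2_celdas_vacias_juntas rest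

-- ===== PORT B =====
-- length of a row's longest maximal run of zeros (the two-pointer scan of Source B:
-- the inner while-loop advancing j is the takeWhile/dropWhile pair over the zero run)
def pvMaxZeroRun : List Int → Nat
  | [] => 0
  | x :: xs =>
    if x = 0 then
      max (1 + (xs.takeWhile (· == 0)).length) (pvMaxZeroRun (xs.dropWhile (· == 0)))
    else pvMaxZeroRun xs
termination_by fila => fila.length
decreasing_by
  · have := List.length_dropWhile_le (fun y => y == (0 : Int)) xs
    simp only [List.length_cons]
    omega
  · simp only [List.length_cons]
    omega

def no_mas_de_2_celdas_vacias_juntas_alt (mi_carton : List (List Int)) : Bool :=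
  mi_carton.all (fun fila => decide (pvMaxZeroRun fila < 3))

-- ===== PRECONDITION & SPEC =====
def Spec_no_mas_de_2_celdas_vacias_juntas (mi_carton : List (List Int)) (out : Bool) : Prop := out = no_mas_de_2_celdas_vacias_juntas_alt mi_carton
instance (mi_carton : List (List Int)) (out : Bool) : Decidable (Spec_no_mas_de_2_celdas_vacias_juntas mi_carton out) := by unfold Spec_no_mas_de_2_celdas_vacias_juntas; infer_instance

-- ===== CLAIM (what is proved, stated in full; the proofs are below) =====
def Claim_equal_no_mas_de_2_celdas_vacias_juntas : Prop := ∀ (mi_carton : List (List Int)), Dom_no_mas_de_2_celdas_vacias_juntas mi_carton → Spec_no_mas_de_2_celdas_vacias_juntas mi_carton (no_mas_de_2_celdas_vacias_juntas mi_carton)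

-- ===== LEMMAS AND PROOFS =====

-- pvMaxZeroRun splits as max of the initial zero run and the rest
lemma maxZeroRun_split (fila : List Int) :
    pvMaxZeroRun fila =
      max (fila.takeWhile (· == 0)).length (pvMaxZeroRun (fila.dropWhile (· == 0))) := by
  cases fila with
  | nil => simp [pvMaxZeroRun]
  | cons x xs =>
    rw [pvMaxZeroRun.eq_def]
    by_cases hx : x = 0
    · simp [hx, List.takeWhile, List.dropWhile, Nat.add_comm]
    · have hb : (x == (0:Int)) = false := by simpa using hx
      simp only [hb, List.takeWhile, List.dropWhile, List.length_nil, Nat.max_eq_right (Nat.zero_le _), hx, if_false]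
      conv_rhs => rw [pvMaxZeroRun.eq_def]
      simp [hx]

-- the running counter sees a row as: counter plus the initial zero run, then the rest
lemma rowHas3_eq (fila : List Int) (contador : Int)
    (h0 : 0 ≤ contador) (h3 : contador < 3) :
    pvRowHas3 fila contador =
      decide (3 ≤ contador + (fila.takeWhile (· == 0)).length ∨
              3 ≤ pvMaxZeroRun (fila.dropWhile (· == 0))) := by
  induction fila generalizing contador with
  | nil =>
    have hz : pvMaxZeroRun ([] : List Int) = 0 := by rw [pvMaxZeroRun]
    simp only [pvRowHas3, List.takeWhile_nil, List.dropWhile_nil, List.length_nil, hz,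
      Nat.cast_zero, add_zero]
    symm
    rw [decide_eq_false]
    omega
  | cons c rest ih =>
    by_cases hc : c = 0
    · have hb : (c == (0:Int)) = true := by simpa using hc
      by_cases h2 : contador = 2
      · have hA : pvRowHas3 (c :: rest) contador = true := by
          simp [pvRowHas3, hc, h2]
        rw [hA]
        symm
        rw [decide_eq_true]
        left
        simp only [List.takeWhile, hb, List.length_cons]
        push_cast
        omega
      · have hne : ¬ (contador + 1 = 3) := by omega
        have hA : pvRowHas3 (c :: rest) contador = pvRowHas3 rest (contador + 1) := by
          simp [pvRowHas3, hc, hne]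
        rw [hA, ih (contador + 1) (by omega) (by omega)]
        simp only [List.takeWhile, List.dropWhile, hb, List.length_cons, decide_eq_decide]
        push_cast
        omega
    · have hb : (c == (0:Int)) = false := by simpa using hc
      have hA : pvRowHas3 (c :: rest) contador = pvRowHas3 rest 0 := by
        simp [pvRowHas3, hc]
      rw [hA, ih 0 (by omega) (by omega)]
      have hrun : pvMaxZeroRun (c :: rest) = pvMaxZeroRun rest := by
        rw [pvMaxZeroRun.eq_def]
        simp [hc]
      simp only [List.takeWhile, List.dropWhile, hb, List.length_nil, Nat.cast_zero,
        add_zero, zero_add, hrun, decide_eq_decide]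
      rw [maxZeroRun_split rest]
      omega

lemma rowHas3_iff_maxRun (fila : List Int) :
    pvRowHas3 fila 0 = decide (3 ≤ pvMaxZeroRun fila) := by
  rw [rowHas3_eq fila 0 (by omega) (by omega), maxZeroRun_split fila]
  simp only [decide_eq_decide, zero_add]
  omega

lemma main_eq (mi_carton : List (List Int)) :
    no_mas_de_2_celdas_vacias_juntas mi_carton = no_mas_de_2_celdas_vacias_juntas_alt mi_carton := by
  induction mi_carton with
  | nil => simp [no_mas_de_2_celdas_vacias_juntas, no_mas_de_2_celdas_vacias_juntas_alt]
  | cons fila rest ih =>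
    simp only [no_mas_de_2_celdas_vacias_juntas, no_mas_de_2_celdas_vacias_juntas_alt,
      List.all_cons, rowHas3_iff_maxRun, ih]
    by_cases h : 3 ≤ pvMaxZeroRun fila
    · simp [h, Nat.not_lt.mpr h]
    · simp [h, Nat.lt_of_not_le h]

-- ===== VERDICT (by name: the statement is the Claim_ definition above) =====
theorem no_mas_de_2_celdas_vacias_juntas_spec : Claim_equal_no_mas_de_2_celdas_vacias_juntas := by
  intro mi_carton _
  unfold Spec_no_mas_de_2_celdas_vacias_juntas
  exact main_eq mi_carton
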